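-- pv_equiv track=rewrite | github.com/AlonSasson/EasyTranslate | TextReplacement.py | devide_text_between_locations
-- ===== SOURCE A (Python) =====
-- import math
--
-- def devide_text_between_locations(words, locations):
--     """ devide the words into the locations correctly (a certain amount of words per location)
--     :param words: a list of words
--     :param locations: the locations we need to devide the words between
--     :return: the words list after deviding them correctly per location
--     """
--     words_count = len(words)
--     for i in range(len(locations)):
--         for j in range(1, math.ceil(words_count / (len(locations) - i))):  # calcualte how many words we need to join
--             words[i] += ' ' + words[i + 1]  # join the next word
--             words.remove(words[i + 1])  # delete the next word
--         words_count -= math.ceil(words_count / (len(locations) - i)) # remove the amount of words we joined from the total count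
--     return words
-- ===== SOURCE B (Python) =====
-- import math
--
-- def devide_text_between_locations(words, locations):
--     """One pass: compute each location's chunk size with the same ceil formula,
--     then join the corresponding slice of words.  (Does not mutate words, unlike
--     the original, which edits the list in place; return value is the same.)"""
--     if not locations:
--         return words
--     result = []
--     remaining = len(words)
--     pos = 0
--     for i in range(len(locations)):
--         count = math.ceil(remaining / (len(locations) - i))
--         if count > 0:
--             result.append(' '.join(words[pos:pos + count]))
--         pos += count
--         remaining -= count
--     return result
-- ===== Notes on version B (the rewrite author's own statement) =====
-- stated objective: simpler
-- what changed: Replaces the in-place join-and-remove mutation of the words list with a single pass that computes each location's chunk size by the same ceil formula and joins one slice per location into a fresh result list.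
import Mathlib
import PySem

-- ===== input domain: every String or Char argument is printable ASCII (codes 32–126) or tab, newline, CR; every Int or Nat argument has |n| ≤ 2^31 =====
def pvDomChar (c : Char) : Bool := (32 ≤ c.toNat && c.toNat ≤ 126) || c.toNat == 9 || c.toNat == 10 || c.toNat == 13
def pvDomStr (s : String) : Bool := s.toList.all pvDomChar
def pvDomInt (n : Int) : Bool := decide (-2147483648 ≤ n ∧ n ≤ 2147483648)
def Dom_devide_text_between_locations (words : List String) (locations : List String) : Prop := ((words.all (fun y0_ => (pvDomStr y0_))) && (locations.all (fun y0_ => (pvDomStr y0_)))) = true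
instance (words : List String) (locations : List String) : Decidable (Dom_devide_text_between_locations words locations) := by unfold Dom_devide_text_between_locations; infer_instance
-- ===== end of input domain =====

-- One honest line: B replaces A's in-place quadratic join-and-remove mutation by a single pass that
-- computes each location's chunk size with the same ceil formula and joins one slice per location
-- (A mutates `words` in place and returns it; B builds a fresh list — the equivalence is about the return value).

-- ===== PORT A =====
-- math.ceil(a / b): exact integer ceiling division (Python's float division is exact at the
-- magnitudes the admitted lists can reach, so the integer ceiling is the Python value).
def pvCeil (a b : Int) : Int := -(PySem.Int.floordiv (-a) b)

-- a + ' ' + b  (Python str concatenation, over the character lists)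
def pvCat2 (a b : String) : String := String.ofList (a.toList ++ ' ' :: b.toList)

-- one body of A's inner loop:  words[i] += ' ' + words[i+1];  words.remove(words[i+1])
def pvStep (ws : List String) (i : Int) : List String :=
  match PySem.List.pyGet? ws i, PySem.List.pyGet? ws (i + 1) with
  | some wi, some wn =>
      let ws' := PySem.List.pySetD ws i (pvCat2 wi wn)
      (PySem.List.remove? ws' wn).getD ws'
  | _, _ => ws  -- Python raises IndexError here; unreachable on the inputs where A returns

-- one body of A's outer loop (st = (words, words_count))
def pvBodyA (L : Int) (st : List String × Int) (i : Int) : List String × Int :=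
  let c := pvCeil st.2 (L - i)
  ((PySem.List.pyRange 1 c 1).foldl (fun ws _j => pvStep ws i) st.1, st.2 - c)

def devide_text_between_locations (words : List String) (locations : List String) : List String :=
  ((PySem.List.pyRange 0 (PySem.List.len locations) 1).foldl
      (pvBodyA (PySem.List.len locations)) (words, PySem.List.len words)).1

-- ===== PORT B =====
-- one body of B's loop (st = (result, pos, remaining))
def pvBodyB (words : List String) (L : Int) (st : List String × Int × Int) (i : Int) :
    List String × Int × Int :=
  let c := pvCeil st.2.2 (L - i)
  ((if 0 < c then
      st.1 ++ [PySem.Str.join " " (PySem.List.slice words (some st.2.1) (some (st.2.1 + c)))]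
    else st.1),
   st.2.1 + c, st.2.2 - c)

def devide_text_between_locations_alt (words : List String) (locations : List String) : List String :=
  if locations = [] then words
  else
    ((PySem.List.pyRange 0 (PySem.List.len locations) 1).foldl
        (pvBodyB words (PySem.List.len locations)) ([], 0, PySem.List.len words)).1

-- ===== PRECONDITION & SPEC =====
-- Pre_ excludes word lists in which some word is equal to the space-join of an earlier consecutive
-- run of two or more words: there A's `words.remove` (removal by VALUE, first match) may delete that
-- earlier, equal, already-joined chunk instead of the adjacent word it just joined — a
-- first-vs-last-match artefact on which A's and B's groupings are both defensible; B always
-- consumes the words left to right.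
def Pre_devide_text_between_locations (words : List String) (locations : List String) : Prop :=
  ∀ a < words.length, ∀ t < words.length, ∀ x ∈ words.drop (a + t + 1),
    1 ≤ t → x ≠ PySem.Str.join " " ((words.drop a).take (t + 1))
instance (words : List String) (locations : List String) : Decidable (Pre_devide_text_between_locations words locations) := by unfold Pre_devide_text_between_locations; infer_instance

def pvWitness_devide_text_between_locations : List String × List String :=
  (["ab", "cd", "ef"], ["x", "y"])

def Spec_devide_text_between_locations (words : List String) (locations : List String) (out : List String) : Prop := out = devide_text_between_locations_alt words locations
instance (words : List String) (locations : List String) (out : List String) : Decidable (Spec_devide_text_between_locations words locations out) := by unfold Spec_devide_text_between_locations; infer_instance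

-- ===== CLAIM (what is proved, stated in full; the proofs are below) =====
def Claim_equal_devide_text_between_locations : Prop := ∀ (words : List String) (locations : List String), Dom_devide_text_between_locations words locations → Pre_devide_text_between_locations words locations → Spec_devide_text_between_locations words locations (devide_text_between_locations words locations)

-- ===== LEMMAS AND PROOFS =====

def ceilN (r k : Nat) : Nat := (r + k - 1) / k

def sjoin : List String → String
  | [] => ""
  | w :: t => t.foldl pvCat2 w

def chunksF : Nat → List String → List String
  | 0, _ => []
  | (k+1), rest =>
      let c := ceilN rest.length (k+1)
      if c = 0 then chunksF k rest
      else sjoin (rest.take c) :: chunksF k (rest.drop c)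

def loopA : Nat → Nat → List String × Int → List String × Int
  | 0, _, st => st
  | (k+1), i, st => loopA k (i+1) (pvBodyA ((i : Int) + (k : Int) + 1) st (i : Int))

def loopB (words : List String) : Nat → Nat → List String × Int × Int → List String × Int × Int
  | 0, _, st => st
  | (k+1), i, st => loopB words k (i+1) (pvBodyB words ((i : Int) + (k : Int) + 1) st (i : Int))

theorem ceilN_char (r k : Nat) : r ≤ (k+1) * ceilN r (k+1) ∧ (k+1) * ceilN r (k+1) < r + (k+1) := by
  unfold ceilN
  have hk : r + (k+1) - 1 = r + k := by omega
  rw [hk]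
  have he := Nat.div_add_mod (r + k) (k+1)
  have hm := Nat.mod_lt (r + k) (y := k+1) (by omega)
  have hm0 : 0 ≤ (r + k) % (k + 1) := Nat.zero_le _
  constructor <;> linarith [he, hm, hm0]
theorem ceilN_one (r : Nat) : ceilN r 1 = r := by unfold ceilN; omega
theorem ceilN_le (r k : Nat) : ceilN r (k+1) ≤ r := by
  obtain ⟨h1, h2⟩ := ceilN_char r k
  by_contra h
  rw [Nat.not_le] at h
  have h5 : (k+1) * (r+1) ≤ (k+1) * ceilN r (k+1) := Nat.mul_le_mul_left _ h
  rw [Nat.mul_succ] at h5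
  have h6 : r ≤ (k+1) * r := Nat.le_mul_of_pos_left r (by omega)
  linarith
theorem ceilN_eq_zero_iff (r k : Nat) : ceilN r (k+1) = 0 ↔ r = 0 := by
  obtain ⟨h1, h2⟩ := ceilN_char r k
  constructor
  · intro h; rw [h, Nat.mul_zero] at h1; omega
  · intro h; subst h; unfold ceilN; simp [Nat.div_eq_of_lt]
theorem ceilN_mono (r k : Nat) : ceilN (r - ceilN r (k+1+1)) (k+1) ≤ ceilN r (k+1+1) := by
  have h1 := (ceilN_char r (k+1)).1
  have h2 := (ceilN_char r (k+1)).2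
  have h3 := (ceilN_char (r - ceilN r (k+1+1)) k).1
  have h4 := (ceilN_char (r - ceilN r (k+1+1)) k).2
  have hle : ceilN r (k+1+1) ≤ r := ceilN_le r (k+1)
  by_contra h
  rw [Nat.not_le] at h
  have h5 : (k+1) * (ceilN r (k+1+1) + 1) ≤ (k+1) * ceilN (r - ceilN r (k+1+1)) (k+1) :=
    Nat.mul_le_mul_left _ h
  have hs : (r - ceilN r (k+1+1)) + ceilN r (k+1+1) = r := Nat.sub_add_cancel hle
  have e1 : (k+1+1) * ceilN r (k+1+1) = (k+1) * ceilN r (k+1+1) + ceilN r (k+1+1) := by ring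
  have e2 : (k+1) * (ceilN r (k+1+1) + 1) = (k+1) * ceilN r (k+1+1) + (k+1) := by ring
  linarith [h1, h2, h3, h4, h5, hs, e1, e2]

theorem pvCeil_natCast (r k : Nat) : pvCeil (r : Int) ((k : Int) + 1) = (ceilN r (k+1) : Int) := by
  unfold pvCeil
  rw [show ((k : Int) + 1) = ((k+1 : Nat) : Int) by push_cast; ring]
  rw [PySem.Int.neg_floordiv_neg_eq_iff_of_pos (by positivity)]
  have h1 := (ceilN_char r k).1
  have h2 := (ceilN_char r k).2
  constructor
  · push_cast
    nlinarith [h1, h2]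
  · push_cast
    nlinarith [h1, h2]

theorem foldl_const_iterate {α β : Type} (l : List β) (f : α → α) (x : α) :
    l.foldl (fun a _ => f a) x = f^[l.length] x := by
  induction l generalizing x with
  | nil => rfl
  | cons b t ih => simp [List.foldl_cons, ih, Function.iterate_succ_apply]

theorem loopA_succ (k i : Nat) (ws : List String) (r : Nat) :
    loopA (k+1) i (ws, (r : Int)) =
      loopA k (i+1) ((fun l => pvStep l (i : Int))^[ceilN r (k+1) - 1] ws,
        ((r - ceilN r (k+1) : Nat) : Int)) := by
  show loopA k (i+1) (pvBodyA ((i : Int) + (k : Int) + 1) (ws, (r : Int)) (i : Int)) = _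
  congr 1
  unfold pvBodyA
  dsimp only
  rw [show ((i : Int) + (k : Int) + 1) - (i : Int) = ((k : Int) + 1) by ring]
  rw [pvCeil_natCast, foldl_const_iterate, PySem.List.length_pyRange_one]
  have hle := ceilN_le r k
  refine Prod.ext ?_ ?_ <;> dsimp only
  · congr 1
    omega
  · omega

theorem loopB_succ (words : List String) (k i : Nat) (res : List String) (p r : Nat) :
    loopB words (k+1) i (res, (p : Int), (r : Int)) =
      loopB words k (i+1)
        ((if ceilN r (k+1) = 0 then res
          else res ++ [PySem.Str.join " " (PySem.List.slice words (some (p : Int)) (some ((p : Int) + (ceilN r (k+1) : Int))))]),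
         ((p + ceilN r (k+1) : Nat) : Int), ((r - ceilN r (k+1) : Nat) : Int)) := by
  show loopB words k (i+1) (pvBodyB words ((i : Int) + (k : Int) + 1) (res, (p : Int), (r : Int)) (i : Int)) = _
  congr 1
  unfold pvBodyB
  dsimp only
  rw [show ((i : Int) + (k : Int) + 1) - (i : Int) = ((k : Int) + 1) by ring]
  rw [pvCeil_natCast]
  have hle := ceilN_le r k
  refine Prod.ext ?_ (Prod.ext ?_ ?_) <;> dsimp only
  · by_cases hc : ceilN r (k+1) = 0
    · simp [hc]
    · rw [if_pos (by exact_mod_cast Nat.pos_of_ne_zero hc), if_neg hc]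
  · omega
  · omega

theorem foldl_bodyA_eq_loopA (k : Nat) : ∀ (i : Nat) (st : List String × Int) (L : Int),
    L = (i : Int) + (k : Int) →
    (PySem.List.pyRange (i : Int) L 1).foldl (pvBodyA L) st = loopA k i st := by
  induction k with
  | zero =>
      intro i st L hL
      rw [PySem.List.pyRange_one_eq_nil (by omega)]
      rfl
  | succ k ih =>
      intro i st L hL
      rw [PySem.List.pyRange_one_cons (by omega)]
      rw [List.foldl_cons]
      have h1 : ((i : Int) + 1) = ((i + 1 : Nat) : Int) := by push_cast; ring
      rw [h1, ih (i+1) _ L (by push_cast; push_cast at hL; omega)]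
      rw [show L = (i : Int) + (k : Int) + 1 from by push_cast at hL ⊢; omega]
      rfl

theorem foldl_bodyB_eq_loopB (words : List String) (k : Nat) :
    ∀ (i : Nat) (st : List String × Int × Int) (L : Int),
    L = (i : Int) + (k : Int) →
    (PySem.List.pyRange (i : Int) L 1).foldl (pvBodyB words L) st = loopB words k i st := by
  induction k with
  | zero =>
      intro i st L hL
      rw [PySem.List.pyRange_one_eq_nil (by omega)]
      rfl
  | succ k ih =>
      intro i st L hL
      rw [PySem.List.pyRange_one_cons (by omega)]
      rw [List.foldl_cons]
      have h1 : ((i : Int) + 1) = ((i + 1 : Nat) : Int) := by push_cast; ring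
      rw [h1, ih (i+1) _ L (by push_cast; push_cast at hL; omega)]
      rw [show L = (i : Int) + (k : Int) + 1 from by push_cast at hL ⊢; omega]
      rfl

theorem toList_pvCat2 (a b : String) : (pvCat2 a b).toList = a.toList ++ ' ' :: b.toList := by
  simp [pvCat2]

theorem pvCat2_ne (w v : String) : pvCat2 w v ≠ v := by
  intro e
  have h := congrArg (fun s => s.toList.length) e
  simp [toList_pvCat2] at h
  omega

-- unbounded form of Pre_ (the bounds in Pre_ are implied by the membership)
def pvNoCollU (ws : List String) : Prop :=
  ∀ a t x, 1 ≤ t → x ∈ ws.drop (a + t + 1) → x ≠ PySem.Str.join " " ((ws.drop a).take (t + 1))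

theorem pre_noCollU (words locations : List String)
    (h : Pre_devide_text_between_locations words locations) : pvNoCollU words := by
  unfold Pre_devide_text_between_locations at h
  intro a t x h1t hx
  have hlt : a + t + 1 < words.length := by
    rcases Nat.lt_or_ge (a + t + 1) words.length with h' | h'
    · exact h'
    · rw [List.drop_eq_nil_of_le h'] at hx
      simp at hx
  exact h a (by omega) t (by omega) x hx h1t

theorem noCollU_drop (ws : List String) (c : Nat) (h : pvNoCollU ws) : pvNoCollU (ws.drop c) := by
  intro a t x h1t hx hxeq
  rw [List.drop_drop] at hx hxeq
  refine h (c + a) t x h1t ?_ hxeq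
  rw [show c + a + t + 1 = c + (a + t + 1) from by omega]
  exact hx

theorem remove?_append_not_mem (v : String) (pre : List String) (t : List String) (h : v ∉ pre) :
    PySem.List.remove? (pre ++ t) v = (PySem.List.remove? t v).map (pre ++ ·) := by
  induction pre with
  | nil => simp
  | cons a pre ih =>
      have ha : a ≠ v := by intro e; exact h (by simp [e])
      rw [List.cons_append, PySem.List.remove?_cons_of_ne _ ha,
        ih (by intro hv; exact h (List.mem_cons_of_mem _ hv))]
      cases PySem.List.remove? t v <;> simp

theorem pvStep_eq (done : List String) (w v : String) (tl : List String)
    (hnd : v ∉ done) :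
    pvStep (done ++ w :: v :: tl) (done.length : Int) = done ++ pvCat2 w v :: tl := by
  unfold pvStep
  rw [PySem.List.pyGet?_append_length]
  rw [show ((done.length : Int) + 1) = ((done.length : Int) + ((1 : Nat) : Int)) from by norm_num]
  rw [PySem.List.pyGet?_append_right]
  rw [show ((w :: v :: tl)[1]?) = some v from rfl]
  dsimp only
  rw [PySem.List.pySetD_natCast, List.set_append_right _ _ (le_refl _), Nat.sub_self]
  dsimp only [List.set]
  have hnc : pvCat2 w v ≠ v := pvCat2_ne w v
  rw [remove?_append_not_mem v done _ hnd,
    PySem.List.remove?_cons_of_ne _ hnc, PySem.List.remove?_cons_self]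
  simp

theorem iter_pvStep_eq (m : Nat) : ∀ (done : List String) (w : String) (rest : List String),
    (∀ x ∈ rest, x ∉ done) → m ≤ rest.length →
    (fun l => pvStep l (done.length : Int))^[m] (done ++ w :: rest) =
      done ++ (rest.take m).foldl pvCat2 w :: rest.drop m := by
  induction m with
  | zero => intro done w rest _ _; simp
  | succ m ih =>
      intro done w rest hnd hm
      cases rest with
      | nil => simp at hm
      | cons v tl =>
          simp only [Function.iterate_succ_apply]
          rw [pvStep_eq done w v tl (hnd v (by simp))]
          rw [ih done (pvCat2 w v) tl (fun x hx => hnd x (by simp [hx])) (by simpa using hm)]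
          simp

theorem chunksF_nil (k : Nat) : chunksF k [] = [] := by
  induction k with
  | zero => rfl
  | succ k ih =>
      show (if ceilN 0 (k+1) = 0 then chunksF k [] else _) = []
      rw [if_pos ((ceilN_eq_zero_iff 0 k).mpr rfl)]
      exact ih

theorem chunksF_tail (k : Nat) : ∀ (rest : List String),
    ceilN rest.length (k+1) ≤ 1 → chunksF (k+1) rest = rest := by
  induction k with
  | zero =>
      intro rest h
      rw [ceilN_one] at h
      show (if ceilN rest.length 1 = 0 then chunksF 0 rest else _) = rest
      rw [ceilN_one]
      cases rest with
      | nil => simp [chunksF]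
      | cons w tl =>
          rw [if_neg (by simp)]
          have htl : tl = [] := by
            have : tl.length = 0 := by simp at h ⊢; omega
            simpa using this
          subst htl
          simp [chunksF, sjoin]
  | succ k ih =>
      intro rest h
      show (if ceilN rest.length (k+1+1) = 0 then chunksF (k+1) rest else _) = rest
      by_cases hc : ceilN rest.length (k+1+1) = 0
      · rw [if_pos hc]
        have : rest = [] := by
          have := (ceilN_eq_zero_iff rest.length (k+1)).mp hc
          simpa using this
        subst this
        exact chunksF_nil _
      · rw [if_neg hc]
        have hc1 : ceilN rest.length (k+1+1) = 1 := by omega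
        cases rest with
        | nil => exact absurd ((ceilN_eq_zero_iff 0 (k+1)).mpr rfl) (by simpa using hc)
        | cons w tl =>
            rw [hc1]
            simp only [List.take_succ_cons, List.take_zero, List.drop_succ_cons, List.drop_zero]
            have hm : ceilN tl.length (k+1) ≤ 1 := by
              have hm0 := ceilN_mono (w :: tl).length k
              rw [hc1] at hm0
              simpa using hm0
            rw [ih tl hm]
            simp [sjoin]

theorem loopA_tail (k : Nat) : ∀ (i : Nat) (ws : List String) (r : Nat),
    ceilN r k ≤ 1 → (loopA k i (ws, (r : Int))).1 = ws := by
  induction k with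
  | zero => intro i ws r _; rfl
  | succ k ih =>
      intro i ws r h
      rw [loopA_succ]
      have h0 : ceilN r (k+1) - 1 = 0 := by omega
      rw [h0]
      simp only [Function.iterate_zero, id]
      cases k with
      | zero => rfl
      | succ k' =>
          exact ih (i+1) ws (r - ceilN r (k'+1+1)) (le_trans (ceilN_mono r k') h)

theorem join_cat_assoc (t : List String) : ∀ (w v : String),
    t.foldl pvCat2 (pvCat2 w v) = String.ofList (w.toList ++ ' ' :: (t.foldl pvCat2 v).toList) := by
  induction t with
  | nil => intro w v; rfl
  | cons u t ih =>
      intro w v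
      rw [List.foldl_cons, List.foldl_cons]
      rw [show pvCat2 (pvCat2 w v) u = pvCat2 w (pvCat2 v u) from by
        simp [pvCat2, String.toList_ofList]]
      exact ih w (pvCat2 v u)

theorem join_eq_sjoin (t : List String) : ∀ (w : String),
    PySem.Str.join " " (w :: t) = t.foldl pvCat2 w := by
  induction t with
  | nil => intro w; simp [PySem.Str.join, PySem.Chars.join, List.intercalate]
  | cons v t ih =>
      intro w
      have step : PySem.Str.join " " (w :: v :: t) =
          String.ofList (w.toList ++ ' ' :: (PySem.Str.join " " (v :: t)).toList) := by
        simp [PySem.Str.join]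
        rw [PySem.Chars.join_cons_cons]
        simp
      rw [step, ih v, List.foldl_cons, join_cat_assoc]

theorem loopA_main (k : Nat) : ∀ (done rest : List String),
    pvNoCollU rest → (∀ x ∈ rest, x ∉ done) →
    (loopA (k+1) done.length (done ++ rest, (rest.length : Int))).1 = done ++ chunksF (k+1) rest := by
  induction k with
  | zero =>
      intro done rest _hnc hnd
      by_cases hc1 : ceilN rest.length 1 ≤ 1
      · rw [loopA_tail 1 _ _ _ hc1, chunksF_tail 0 rest hc1]
      · rw [ceilN_one] at hc1
        rw [Nat.not_le] at hc1
        cases rest with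
        | nil => simp at hc1
        | cons w tl =>
            rw [loopA_succ]
            rw [ceilN_one]
            have hlen : (w :: tl).length - 1 = tl.length := by simp
            rw [hlen]
            rw [iter_pvStep_eq tl.length done w tl (fun x hx => hnd x (by simp [hx])) (le_refl _)]
            rw [List.take_length, List.drop_length]
            show done ++ [tl.foldl pvCat2 w] = done ++ chunksF 1 (w :: tl)
            congr 1
            show _ = (if ceilN (w :: tl).length 1 = 0 then chunksF 0 (w :: tl)
              else sjoin ((w :: tl).take (ceilN (w :: tl).length 1)) :: chunksF 0 ((w :: tl).drop (ceilN (w :: tl).length 1)))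
            rw [ceilN_one, if_neg (by simp), List.take_length]
            rfl
  | succ k ih =>
      intro done rest hnc hnd
      by_cases hc1 : ceilN rest.length (k+1+1) ≤ 1
      · rw [loopA_tail (k+1+1) _ _ _ hc1, chunksF_tail (k+1) rest hc1]
      · rw [Nat.not_le] at hc1
        have hle := ceilN_le rest.length (k+1)
        cases rest with
        | nil => rw [show ([] : List String).length = 0 from rfl, (ceilN_eq_zero_iff 0 (k+1)).mpr rfl] at hc1; omega
        | cons w tl =>
            set c := ceilN (w :: tl).length (k+1+1) with hc
            set m := c - 1 with hmdef
            have hm1 : 1 ≤ m := by omega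
            have hmle : m ≤ tl.length := by
              have : (w :: tl).length = tl.length + 1 := by simp
              omega
            have hcm : c = m + 1 := by omega
            rw [loopA_succ]
            rw [← hc, ← hmdef]
            rw [iter_pvStep_eq m done w tl (fun x hx => hnd x (by simp [hx])) hmle]
            have hstate : done ++ (tl.take m).foldl pvCat2 w :: tl.drop m =
                (done ++ [(tl.take m).foldl pvCat2 w]) ++ tl.drop m := by simp
            have hrem : (w :: tl).length - c = (tl.drop m).length := by
              simp [List.length_drop]
              omega
            rw [hstate, hrem]
            have hidx : done.length + 1 = (done ++ [(tl.take m).foldl pvCat2 w]).length := by simp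
            rw [hidx]
            -- the joined chunk, as B computes it
            have hjoin : PySem.Str.join " " ((w :: tl).take c) = (tl.take m).foldl pvCat2 w := by
              rw [hcm, List.take_succ_cons, join_eq_sjoin]
            have hnc' : pvNoCollU (tl.drop m) := by
              have h := noCollU_drop (w :: tl) c hnc
              rwa [hcm, List.drop_succ_cons] at h
            have hnd' : ∀ x ∈ tl.drop m, x ∉ done ++ [(tl.take m).foldl pvCat2 w] := by
              intro x hx hmem
              rcases List.mem_append.mp hmem with h | h
              · exact hnd x (List.mem_cons_of_mem _ (List.mem_of_mem_drop hx)) h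
              · have hxc : x = (tl.take m).foldl pvCat2 w := List.mem_singleton.mp h
                refine hnc 0 m x hm1 ?_ ?_
                · rw [show 0 + m + 1 = m + 1 from by omega, List.drop_succ_cons]
                  exact hx
                · rw [List.drop_zero, ← hcm, hjoin]
                  exact hxc
            rw [ih (done ++ [(tl.take m).foldl pvCat2 w]) (tl.drop m) hnc' hnd']
            show _ = done ++ (if c = 0 then chunksF (k+1) (w :: tl)
              else sjoin ((w :: tl).take c) :: chunksF (k+1) ((w :: tl).drop c))
            rw [if_neg (by omega)]
            rw [hcm, List.take_succ_cons, List.drop_succ_cons]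
            simp [sjoin]

theorem loopB_main (words : List String) (k : Nat) : ∀ (res : List String) (p i : Nat),
    (loopB words (k+1) i (res, (p : Int), ((words.drop p).length : Int))).1 =
      res ++ chunksF (k+1) (words.drop p) := by
  induction k with
  | zero =>
      intro res p i
      rw [loopB_succ]
      set rest := words.drop p with hrest
      set c := ceilN rest.length 1 with hc
      by_cases h0 : c = 0
      · rw [if_pos h0]
        have : rest = [] := by
          have := (ceilN_eq_zero_iff rest.length 0).mp (by rw [← hc]; exact h0)
          simpa using this
        rw [this, chunksF_nil]
        simp [loopB]
      · rw [if_neg h0]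
        have hr1 : 1 ≤ rest.length := by
          by_contra hh
          exact h0 (by rw [hc, (ceilN_eq_zero_iff rest.length 0)]; omega)
        have hceq : c = rest.length := by rw [hc, ceilN_one]
        simp only [loopB]
        rw [PySem.List.slice_natCast_add, ← hrest]
        cases htm : rest.take c with
        | nil =>
            exfalso
            have h2 : (rest.take c).length = 0 := by rw [htm]; rfl
            rw [List.length_take] at h2
            omega
        | cons u t'' =>
            rw [join_eq_sjoin]
            show res ++ [t''.foldl pvCat2 u] = res ++ chunksF 1 rest
            congr 1
            rw [show chunksF 1 rest = (if ceilN rest.length 1 = 0 then chunksF 0 rest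
              else sjoin (rest.take (ceilN rest.length 1)) :: chunksF 0 (rest.drop (ceilN rest.length 1))) from rfl]
            rw [← hc, if_neg h0, htm]
            rfl
  | succ k ih =>
      intro res p i
      rw [loopB_succ]
      set rest := words.drop p with hrest
      set c := ceilN rest.length (k+1+1) with hc
      have hdd : words.drop (p + c) = rest.drop c := by
        rw [hrest, List.drop_drop]
      have hle := ceilN_le rest.length (k+1)
      have hrem : rest.length - c = (words.drop (p + c)).length := by
        rw [hdd]
        simp only [hrest, List.length_drop]
        try omega
      by_cases h0 : c = 0
      · rw [if_pos h0]
        have hre : rest = [] := by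
          have := (ceilN_eq_zero_iff rest.length (k+1)).mp (by rw [← hc]; exact h0)
          simpa using this
        have h1 : (p + c) = p := by omega
        have h2 : rest.length - c = (words.drop p).length := by rw [← hrest]; omega
        rw [show rest.length - c = (words.drop p).length from h2]
        rw [show p + c = p from h1]
        rw [ih res p (i+1)]
        rw [← hrest, hre, chunksF_nil, chunksF_nil]
      · rw [if_neg h0]
        rw [hrem]
        rw [ih (res ++ [PySem.Str.join " " (PySem.List.slice words (some (p:Int)) (some ((p:Int) + (c:Int))))]) (p + c) (i+1)]
        rw [PySem.List.slice_natCast_add, ← hrest, hdd]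
        have hr1 : 1 ≤ rest.length := by
          by_contra hh
          exact h0 (by rw [hc, (ceilN_eq_zero_iff rest.length (k+1))]; omega)
        cases htm : rest.take c with
        | nil =>
            exfalso
            have h2 : (rest.take c).length = 0 := by rw [htm]; rfl
            rw [List.length_take] at h2
            omega
        | cons u t'' =>
            rw [join_eq_sjoin]
            show res ++ [t''.foldl pvCat2 u] ++ chunksF (k+1) (rest.drop c) = res ++ chunksF (k+1+1) rest
            rw [show chunksF (k+1+1) rest = (if ceilN rest.length (k+1+1) = 0 then chunksF (k+1) rest
              else sjoin (rest.take (ceilN rest.length (k+1+1))) :: chunksF (k+1) (rest.drop (ceilN rest.length (k+1+1)))) from rfl]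
            rw [← hc, if_neg h0, htm]
            simp [sjoin]

-- ===== VERDICT (by name: the statement is the Claim_ definition above) =====
theorem devide_text_between_locations_spec : Claim_equal_devide_text_between_locations := by
  unfold Claim_equal_devide_text_between_locations
  intro words locations _hdom hpre
  unfold Spec_devide_text_between_locations
  cases locations with
  | nil =>
      unfold devide_text_between_locations devide_text_between_locations_alt
      rw [if_pos rfl]
      rw [show PySem.List.len ([] : List String) = 0 from by simp]
      rw [PySem.List.pyRange_one_eq_nil (le_refl 0)]
      rfl
  | cons l ls =>
      unfold devide_text_between_locations devide_text_between_locations_alt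
      rw [if_neg (by simp)]
      have hlen : PySem.List.len (l :: ls) = ((0 : Nat) : Int) + ((ls.length + 1 : Nat) : Int) := by
        simp
      have hA := foldl_bodyA_eq_loopA (ls.length + 1) 0 (words, PySem.List.len words)
        (PySem.List.len (l :: ls)) hlen
      have hB := foldl_bodyB_eq_loopB words (ls.length + 1) 0 ([], 0, PySem.List.len words)
        (PySem.List.len (l :: ls)) hlen
      norm_num at hA hB
      simp only [PySem.List.len_eq, List.length_cons] at hA hB ⊢
      push_cast at hA hB ⊢
      rw [hA, hB]
      have hMA := loopA_main ls.length [] words (pre_noCollU words (l :: ls) hpre) (by simp)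
      simp only [List.length_nil, List.nil_append] at hMA
      rw [hMA]
      have hMB := loopB_main words ls.length [] 0 0
      simp only [List.drop_zero, List.nil_append] at hMB
      norm_num at hMB
      rw [hMB]
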